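-- pv_equiv track=rewrite | github.com/TravisBallard/ClassifySVGs | ClassifySVGs.py | classifySingleLineSVG
-- ===== SOURCE A (Python) =====
-- def classifySingleLineSVG(elementName, line):
-- 	parts = line.split('<' + elementName)
-- 	for index, part in enumerate(parts, start=0):
-- 		if index == 0 :
-- 			output = parts[index]
-- 		else :
-- 			output += '<' + elementName + ' class="'+elementName+str(index-1)+'"' + parts[index]
-- 	return output
-- ===== SOURCE B (Python) =====
-- def classifySingleLineSVG(elementName, line):
--     # Single forward scan with str.find instead of split-and-rebuild.
--     tag = '<' + elementName
--     out = []
--     i = 0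
--     k = 0
--     while True:
--         j = line.find(tag, i)
--         if j == -1:
--             out.append(line[i:])
--             return ''.join(out)
--         out.append(line[i:j])
--         out.append(tag + ' class="' + elementName + str(k) + '"')
--         i = j + len(tag)
--         k += 1
-- ===== Notes on version B (the rewrite author's own statement) =====
-- stated objective: alternative
-- what changed: Replaces split-into-parts plus an enumerate-indexed rebuild loop with a single forward str.find scan that emits chunks into a list joined once at the end.
import Mathlib
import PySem

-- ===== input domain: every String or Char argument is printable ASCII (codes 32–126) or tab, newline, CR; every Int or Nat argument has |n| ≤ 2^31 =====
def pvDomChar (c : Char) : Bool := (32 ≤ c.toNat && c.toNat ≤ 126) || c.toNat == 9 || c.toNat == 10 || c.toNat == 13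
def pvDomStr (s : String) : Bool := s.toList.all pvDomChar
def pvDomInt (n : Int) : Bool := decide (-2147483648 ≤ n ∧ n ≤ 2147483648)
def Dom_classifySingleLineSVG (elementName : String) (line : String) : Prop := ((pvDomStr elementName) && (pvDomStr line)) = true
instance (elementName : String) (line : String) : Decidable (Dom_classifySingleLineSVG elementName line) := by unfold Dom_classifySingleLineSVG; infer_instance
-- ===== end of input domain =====

-- B replaces A's split-into-parts-and-rebuild loop by a single forward find scan emitting
-- chunks that are joined once at the end (objective: alternative; same asymptotic cost).

-- ===== PORT A =====
-- A: parts = line.split('<'+elementName); rebuild with 'class="elementNameI"' inserted.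
def classifySingleLineSVG (elementName : String) (line : String) : String :=
  let sep := ("<" ++ elementName).toList
  let parts := PySem.Chars.splitOn line.toList sep
  String.mk <| (PySem.List.enumerate parts 0).foldl
    (fun output ip =>
      if ip.1 = 0 then ip.2
      else output ++ ("<" ++ elementName).toList ++ (" class=\"").toList ++ elementName.toList
             ++ PySem.Int.toChars (ip.1 - 1) ++ ("\"").toList ++ ip.2)
    []

-- ===== PORT B =====
-- B's while-loop: i = scan position, k = match counter, out = emitted chunks.
-- fuel = line.length + 1 dominates the loop (i strictly increases each iteration).
def classifyAltGo (sep e line : List Char) : Nat → Nat → Nat → List (List Char) → List (List Char)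
  | 0, _, _, out => out
  | fuel + 1, i, k, out =>
    let j := PySem.Chars.findFrom line sep (i : Int) none
    if j = -1 then out ++ [PySem.Chars.slice line (some (i : Int)) none]
    else classifyAltGo sep e line fuel (j.toNat + sep.length) (k + 1)
      (out ++ [PySem.Chars.slice line (some (i : Int)) (some j),
               sep ++ (" class=\"").toList ++ e ++ PySem.Int.toChars (k : Int) ++ ("\"").toList])

def classifySingleLineSVG_alt (elementName : String) (line : String) : String :=
  let tag := ("<" ++ elementName).toList
  String.mk (PySem.Chars.join []
    (classifyAltGo tag elementName.toList line.toList (line.toList.length + 1) 0 0 []))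

-- ===== PRECONDITION & SPEC =====
def Spec_classifySingleLineSVG (elementName : String) (line : String) (out : String) : Prop := out = classifySingleLineSVG_alt elementName line
instance (elementName : String) (line : String) (out : String) : Decidable (Spec_classifySingleLineSVG elementName line out) := by unfold Spec_classifySingleLineSVG; infer_instance

-- ===== CLAIM (what is proved, stated in full; the proofs are below) =====
def Claim_equal_classifySingleLineSVG : Prop := ∀ (elementName : String) (line : String), Dom_classifySingleLineSVG elementName line → Spec_classifySingleLineSVG elementName line (classifySingleLineSVG elementName line)

-- ===== LEMMAS AND PROOFS =====

-- the decoration B inserts at the k-th match (and A inserts before part k+1)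
def clsChunk (sep e : List Char) (k : Nat) : List Char :=
  sep ++ (" class=\"").toList ++ e ++ PySem.Int.toChars (k : Int) ++ ("\"").toList

-- spec of the tail of the output from a suffix s, next class index k, a decoration first
def dSpec (sep e : List Char) (s : List Char) (k : Nat) : List Char :=
  if _hcond : sep = [] ∨ PySem.Chars.find s sep = -1 then clsChunk sep e k ++ s
  else
    clsChunk sep e k ++ s.take (PySem.Chars.find s sep).toNat
      ++ dSpec sep e (s.drop ((PySem.Chars.find s sep).toNat + sep.length)) (k + 1)
  termination_by s.length
  decreasing_by
    push_neg at _hcond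
    obtain ⟨hsep, hf⟩ := _hcond
    have h0 : 0 ≤ PySem.Chars.find s sep := by
      have := PySem.Chars.neg_one_le_find s sep; omega
    have hpre := (PySem.Chars.find_spec h0).1
    have hlen := hpre.length_le
    simp only [List.length_drop] at hlen ⊢
    have hsl : 1 ≤ sep.length := by
      cases sep with
      | nil => exact absurd rfl hsep
      | cons a t => simp
    omega

lemma dSpec_unfold (sep e : List Char) (hsep : sep ≠ []) (s : List Char) (k : Nat) :
    dSpec sep e s k =
      if PySem.Chars.find s sep = -1 then clsChunk sep e k ++ s
      else clsChunk sep e k ++ s.take (PySem.Chars.find s sep).toNat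
        ++ dSpec sep e (s.drop ((PySem.Chars.find s sep).toNat + sep.length)) (k + 1) := by
  rw [dSpec.eq_def]
  by_cases hf : PySem.Chars.find s sep = -1 <;> simp [hf, hsep]

-- spec of the whole output from a suffix s, next class index k, no decoration first
def eSpec (sep e : List Char) (s : List Char) (k : Nat) : List Char :=
  if PySem.Chars.find s sep = -1 then s
  else s.take (PySem.Chars.find s sep).toNat
    ++ dSpec sep e (s.drop ((PySem.Chars.find s sep).toNat + sep.length)) k

lemma dSpec_eq (sep e s : List Char) (k : Nat) (hsep : sep ≠ []) :
    dSpec sep e s k = clsChunk sep e k ++ eSpec sep e s (k + 1) := by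
  rw [dSpec_unfold sep e hsep, eSpec]
  by_cases hf : PySem.Chars.find s sep = -1 <;> simp [hf]

-- joining with the empty separator distributes over list append
lemma joinNil_append (xs ys : List (List Char)) :
    PySem.Chars.join [] (xs ++ ys) = PySem.Chars.join [] xs ++ PySem.Chars.join [] ys := by
  induction xs with
  | nil => simp [PySem.Chars.join_nil]
  | cons x t ih =>
    cases t with
    | nil =>
      cases ys with
      | nil => simp [PySem.Chars.join_nil, PySem.Chars.join_singleton]
      | cons y ys' => simp [PySem.Chars.join_cons_cons, PySem.Chars.join_singleton]
    | cons z t' =>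
      simp only [List.cons_append, PySem.Chars.join_cons_cons] at ih ⊢
      simp [ih]

-- find.go offset in the running index
lemma findgo_offset (sub l : List Char) (k : Nat) :
    PySem.Chars.find.go sub l k =
      if PySem.Chars.find.go sub l 0 = -1 then -1 else PySem.Chars.find.go sub l 0 + k := by
  induction l generalizing k with
  | nil => simp only [PySem.Chars.find.go]; split_ifs <;> first | contradiction | omega
  | cons c t ih =>
    by_cases hp : sub.isPrefixOf (c :: t) = true
    · simp only [PySem.Chars.find.go, hp, if_true]
      split_ifs <;> first | contradiction | omega
    · have hge : (-1 : Int) ≤ PySem.Chars.find.go sub t 0 := PySem.Chars.neg_one_le_find t sub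
      simp only [PySem.Chars.find.go, hp]
      rw [ih (k + 1), ih 1]
      split_ifs <;> first | contradiction | omega

lemma find_nil_of_ne (sub : List Char) (hsub : sub ≠ []) : PySem.Chars.find [] sub = -1 := by
  rw [PySem.Chars.find_eq_neg_one_iff]
  intro h
  exact hsub (List.eq_nil_of_infix_nil h)

lemma find_of_prefix (sub l : List Char) (hp : sub.isPrefixOf l = true) :
    PySem.Chars.find l sub = 0 := by
  cases l with
  | nil =>
    have : sub = [] := List.prefix_nil.mp (List.isPrefixOf_iff_prefix.mp hp)
    simp [PySem.Chars.find, PySem.Chars.find.go, this]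
  | cons c t => simp [PySem.Chars.find, PySem.Chars.find.go, hp]

lemma find_cons_of_not_prefix (sub : List Char) (c : Char) (t : List Char)
    (hp : ¬ sub.isPrefixOf (c :: t) = true) :
    PySem.Chars.find (c :: t) sub =
      if PySem.Chars.find t sub = -1 then -1 else PySem.Chars.find t sub + 1 := by
  simp only [PySem.Chars.find, PySem.Chars.find.go, hp]
  exact findgo_offset sub t 1

-- splitOn.go: the accumulator factors out
lemma splitOnGo_acc (sep : List Char) (fuel : Nat) :
    ∀ (l cur : List Char) (acc : List (List Char)),
      PySem.Chars.splitOn.go sep fuel l cur acc =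
        acc.reverse ++ PySem.Chars.splitOn.go sep fuel l cur [] := by
  induction fuel with
  | zero => intro l cur acc; simp [PySem.Chars.splitOn.go]
  | succ fuel ih =>
    intro l cur acc
    cases l with
    | nil => simp [PySem.Chars.splitOn.go]
    | cons c t =>
      simp only [PySem.Chars.splitOn.go]
      split_ifs with hp
      · rw [ih _ [] (cur.reverse :: acc), ih _ [] [cur.reverse]]
        simp
      · exact ih t (c :: cur) acc

-- splitOn.go is fuel-irrelevant above the length of the remaining input
lemma splitOnGo_fuel (sep : List Char) (hsep : sep ≠ []) :
    ∀ (f1 : Nat) (l cur : List Char) (acc : List (List Char)) (f2 : Nat),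
      l.length < f1 → l.length < f2 →
      PySem.Chars.splitOn.go sep f1 l cur acc = PySem.Chars.splitOn.go sep f2 l cur acc := by
  intro f1
  induction f1 with
  | zero => intro l cur acc f2 h1 h2; omega
  | succ f1 ih =>
    intro l cur acc f2 h1 h2
    cases l with
    | nil =>
      cases f2 with
      | zero => omega
      | succ f2 => simp [PySem.Chars.splitOn.go]
    | cons c t =>
      cases f2 with
      | zero => omega
      | succ f2 =>
        simp only [PySem.Chars.splitOn.go]
        split_ifs with hp
        · have hpre := List.isPrefixOf_iff_prefix.mp hp
          have hsl : 1 ≤ sep.length := by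
            cases sep with
            | nil => exact absurd rfl hsep
            | cons a u => simp
          apply ih
          · simp only [List.length_drop]; simp at h1 ⊢; omega
          · simp only [List.length_drop]; simp at h2 ⊢; omega
        · apply ih <;> simp at h1 h2 ⊢ <;> omega

-- one step of splitOn, phrased with find
lemma splitOn_step (sep : List Char) (hsep : sep ≠ []) (s : List Char) :
    PySem.Chars.splitOn s sep =
      if PySem.Chars.find s sep = -1 then [s]
      else
        s.take (PySem.Chars.find s sep).toNat ::
          PySem.Chars.splitOn (s.drop ((PySem.Chars.find s sep).toNat + sep.length)) sep := by
  suffices h : ∀ (fuel : Nat) (s cur : List Char), s.length < fuel →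
      PySem.Chars.splitOn.go sep fuel s cur [] =
        if PySem.Chars.find s sep = -1 then [cur.reverse ++ s]
        else
          (cur.reverse ++ s.take (PySem.Chars.find s sep).toNat) ::
            PySem.Chars.splitOn (s.drop ((PySem.Chars.find s sep).toNat + sep.length)) sep by
    have h2 := h (s.length + 1) s [] (by omega)
    simp only [List.reverse_nil, List.nil_append] at h2
    exact h2
  intro fuel
  induction fuel with
  | zero => intro s cur h; omega
  | succ fuel ih =>
    intro s cur h
    cases s with
    | nil =>
      simp [PySem.Chars.splitOn.go, find_nil_of_ne sep hsep]
    | cons c t =>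
      by_cases hp : sep.isPrefixOf (c :: t) = true
      · have hf := find_of_prefix sep (c :: t) hp
        have hpre := List.isPrefixOf_iff_prefix.mp hp
        have hlen := hpre.length_le
        have hsl : 1 ≤ sep.length := by
          cases sep with
          | nil => exact absurd rfl hsep
          | cons a u => simp
        simp only [PySem.Chars.splitOn.go, hp, if_true]
        rw [splitOnGo_acc]
        have hfuel : ((c :: t).drop sep.length).length < fuel := by
          simp only [List.length_drop]; simp at h ⊢; omega
        rw [splitOnGo_fuel sep hsep fuel _ [] [] (((c :: t).drop sep.length).length + 1) hfuel (by omega)]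
        have hdef : PySem.Chars.splitOn.go sep (((c :: t).drop sep.length).length + 1) ((c :: t).drop sep.length) [] [] = PySem.Chars.splitOn ((c :: t).drop sep.length) sep := rfl
        rw [hdef]
        simp [hf]
      · simp only [PySem.Chars.splitOn.go, hp]
        rw [ih t (c :: cur) (by simp at h ⊢; omega)]
        rw [find_cons_of_not_prefix sep c t hp]
        by_cases hf : PySem.Chars.find t sep = -1
        · simp [hf]
        · have hge := PySem.Chars.neg_one_le_find t sep
          have h0 : 0 ≤ PySem.Chars.find t sep := by omega
          have hne : ¬ (PySem.Chars.find t sep + 1 = -1) := by omega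
          have htn : (PySem.Chars.find t sep + 1).toNat = (PySem.Chars.find t sep).toNat + 1 := by omega
          have harr : (PySem.Chars.find t sep).toNat + 1 + sep.length = ((PySem.Chars.find t sep).toNat + sep.length) + 1 := by omega
          simp [hf, hne, htn, harr, List.take_succ_cons, List.drop_succ_cons]

-- A's fold over the enumerated tail parts equals dSpec
lemma foldA_eq_dSpec (sep e : List Char) (hsep : sep ≠ []) :
    ∀ (s : List Char) (k : Nat) (acc : List Char),
      (PySem.List.enumerate (PySem.Chars.splitOn s sep) ((k : Int) + 1)).foldl
        (fun output ip =>
          if ip.1 = 0 then ip.2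
          else output ++ sep ++ (" class=\"").toList ++ e
                 ++ PySem.Int.toChars (ip.1 - 1) ++ ("\"").toList ++ ip.2)
        acc = acc ++ dSpec sep e s k := by
  intro s
  induction hn : s.length using Nat.strong_induction_on generalizing s with
  | _ n ih =>
  intro k acc
  subst hn
  rw [splitOn_step sep hsep s, dSpec_unfold sep e hsep]
  have hk0 : ¬ ((k : Int) + 1 = 0) := by omega
  have hk1 : (k : Int) + 1 - 1 = (k : Int) := by omega
  split_ifs with hf
  · simp only [PySem.List.enumerate, List.foldl]
    simp [hk0, hk1, clsChunk]
  · have h0 : 0 ≤ PySem.Chars.find s sep := by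
      have := PySem.Chars.neg_one_le_find s sep; omega
    have hpre := (PySem.Chars.find_spec h0).1
    have hlen := hpre.length_le
    have hsl : 1 ≤ sep.length := by
      cases sep with
      | nil => exact absurd rfl hsep
      | cons a u => simp
    simp only [List.length_drop] at hlen
    simp only [PySem.List.enumerate, List.foldl]
    have harg : (k : Int) + 1 + 1 = ((k + 1 : Nat) : Int) + 1 := by push_cast; omega
    rw [harg,
      ih (s.drop ((PySem.Chars.find s sep).toNat + sep.length)).length
        (by simp only [List.length_drop]; omega)
        _ rfl (k + 1)]
    simp [hk0, hk1, clsChunk]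

-- B's loop from position i equals eSpec of the suffix
lemma altGo_eq_eSpec (sep e line : List Char) (hsep : sep ≠ []) :
    ∀ (fuel i k : Nat) (out : List (List Char)),
      i ≤ line.length → line.length - i < fuel →
      PySem.Chars.join [] (classifyAltGo sep e line fuel i k out) =
        PySem.Chars.join [] out ++ eSpec sep e (line.drop i) k := by
  intro fuel
  induction fuel with
  | zero => intro i k out h1 h2; omega
  | succ fuel ih =>
    intro i k out h1 h2
    simp only [classifyAltGo]
    rw [PySem.Chars.findFrom_natCast line sep i h1]
    have hge := PySem.Chars.neg_one_le_find (line.drop i) sep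
    by_cases hf : PySem.Chars.find (line.drop i) sep = -1
    · rw [eSpec]
      simp only [hf, if_pos]
      simp only [PySem.Chars.slice_eq_listSlice]
      rw [PySem.List.slice_from line (Int.natCast_nonneg i)]
      simp only [Int.toNat_natCast]
      rw [joinNil_append]
      simp [PySem.Chars.join_singleton]
    · have h0 : 0 ≤ PySem.Chars.find (line.drop i) sep := by omega
      have hnot : ¬ ((i : Int) + PySem.Chars.find (line.drop i) sep = -1) := by omega
      simp only [hf, if_false, hnot]
      have hpre := (PySem.Chars.find_spec h0).1
      have hlen := hpre.length_le
      have hsl : 1 ≤ sep.length := by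
        cases sep with
        | nil => exact absurd rfl hsep
        | cons a u => simp
      simp only [List.length_drop, List.drop_drop] at hlen
      set m := (PySem.Chars.find (line.drop i) sep).toNat with hm
      have hj : ((i : Int) + PySem.Chars.find (line.drop i) sep).toNat = i + m := by omega
      rw [hj]
      have hbound : i + m + sep.length ≤ line.length := by omega
      rw [ih (i + m + sep.length) (k + 1) _ hbound (by omega)]
      have hslice : PySem.Chars.slice line (some (i : Int)) (some ((i : Int) + PySem.Chars.find (line.drop i) sep)) = (line.drop i).take m := by
        have hcast : (i : Int) + PySem.Chars.find (line.drop i) sep = ((i + m : Nat) : Int) := by push_cast; omega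
        rw [hcast]
        simp only [PySem.Chars.slice_eq_listSlice]
        rw [PySem.List.slice_natCast line i (i + m)]
        congr 1
        omega
      rw [hslice]
      conv_rhs => rw [eSpec]
      rw [if_neg hf]
      rw [dSpec_eq sep e _ k hsep]
      have hdd : line.drop (i + m + sep.length) = (line.drop i).drop (m + sep.length) := by
        rw [List.drop_drop]; congr 1; omega
      rw [hdd]
      rw [joinNil_append]
      simp [clsChunk, hm, PySem.Chars.join_cons_cons, PySem.Chars.join_singleton]

-- ===== VERDICT (by name: the statement is the Claim_ definition above) =====
theorem classifySingleLineSVG_spec : Claim_equal_classifySingleLineSVG := by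
  intro elementName line _
  unfold Spec_classifySingleLineSVG classifySingleLineSVG classifySingleLineSVG_alt
  have hsep : ("<" ++ elementName).toList ≠ [] := by simp
  show String.mk _ = String.mk _
  congr 1
  rw [altGo_eq_eSpec ("<" ++ elementName).toList elementName.toList line.toList hsep
        (line.toList.length + 1) 0 0 [] (by omega) (by omega)]
  rw [PySem.Chars.join_nil, List.drop_zero, List.nil_append]
  rw [splitOn_step _ hsep line.toList, eSpec]
  by_cases hf : PySem.Chars.find line.toList ("<" ++ elementName).toList = -1
  · rw [if_pos hf, if_pos hf]
    simp [PySem.List.enumerate]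
  · rw [if_neg hf, if_neg hf]
    simp only [PySem.List.enumerate, List.foldl_cons]
    have h01 : (0 : Int) + 1 = ((0 : Nat) : Int) + 1 := by norm_num
    rw [h01, foldA_eq_dSpec _ _ hsep _ 0]
    simp
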